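-- pv_equiv track=rewrite | github.com/pasaunders/code-katas | src/unique_string.py | find_uniq
-- ===== SOURCE A (Python) =====
-- from itertools import combinations
--
-- def find_uniq(arr):
--     """Sort through each combination of three strings.
--
--     If a set of one doesn't match the other two sets, return it.
--     """
--     for first, second, third in combinations(arr, 3):
--         if set(first.lower()) != set(second.lower()):
--             if set(first.lower()) != set(third.lower()):
--                 return first
--             return second
--         if set(first.lower()) != set(third.lower()):
--             return third
--     return None
-- ===== SOURCE B (Python) =====
-- def find_uniq(arr):
--     """Find the string whose lowercased letter set differs, by one linear scan."""
--     if len(arr) < 3: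
--         return None
--     sets = [set(s.lower()) for s in arr]
--     if sets[0] != sets[1]:
--         return arr[0] if sets[0] != sets[2] else arr[1]
--     for s, ss in zip(arr[2:], sets[2:]):
--         if ss != sets[0]:
--             return s
--     return None
-- ===== Notes on version B (the rewrite author's own statement) =====
-- stated objective: faster
-- what changed: B precomputes each string's lowercased character set once and replaces A's scan over all C(n,3) index triples with a single linear pass (after one comparison of the first three sets), keeping A's exact branch results.
import Mathlib
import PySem

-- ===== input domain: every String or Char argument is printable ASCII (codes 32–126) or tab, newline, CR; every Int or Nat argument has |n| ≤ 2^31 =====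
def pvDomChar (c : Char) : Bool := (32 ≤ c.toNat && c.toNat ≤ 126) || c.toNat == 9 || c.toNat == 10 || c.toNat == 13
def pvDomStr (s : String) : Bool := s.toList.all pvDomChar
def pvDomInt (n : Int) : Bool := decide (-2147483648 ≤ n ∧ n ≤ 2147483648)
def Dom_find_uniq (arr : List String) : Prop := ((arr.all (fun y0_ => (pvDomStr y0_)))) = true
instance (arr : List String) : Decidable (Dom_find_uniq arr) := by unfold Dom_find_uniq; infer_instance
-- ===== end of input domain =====

-- B replaces A's scan over all C(n,3) triples with precomputed lowercased character sets and one linear scan (objective: faster; same return values).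
-- ===== PORT A =====
-- set(s.lower())
def pvKeyA (s : String) : PySem.Set Char := PySem.Set.ofList (PySem.Str.lower s).toList

-- itertools helpers: combinations(l, 2) and combinations(l, 3) in lexicographic order
def pvPairs2 (l : List String) : List (String × String) :=
  match l with
  | [] => []
  | x :: xs => xs.map (fun y => (x, y)) ++ pvPairs2 xs

def pvCombos3 (l : List String) : List (String × String × String) :=
  match l with
  | [] => []
  | x :: xs => (pvPairs2 xs).map (fun p => (x, p.1, p.2)) ++ pvCombos3 xs

-- the for-loop over the triples, branches in A's order
def pvLoopA : List (String × String × String) → Option String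
  | [] => none
  | (first, second, third) :: rest =>
    if !(PySem.Set.equal (pvKeyA first) (pvKeyA second)) then
      if !(PySem.Set.equal (pvKeyA first) (pvKeyA third)) then some first else some second
    else if !(PySem.Set.equal (pvKeyA first) (pvKeyA third)) then some third
    else pvLoopA rest

def find_uniq (arr : List String) : Option String :=
  pvLoopA (pvCombos3 arr)

-- ===== PORT B =====
def pvKeyB (s : String) : PySem.Set Char := PySem.Set.ofList (PySem.Str.lower s).toList

-- the zip-scan over arr[2:]: first string whose set differs from sets[0]
def pvScanB (k : PySem.Set Char) : List String → Option String
  | [] => none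
  | s :: rest => if !(PySem.Set.equal (pvKeyB s) k) then some s else pvScanB k rest

def find_uniq_alt (arr : List String) : Option String :=
  match arr with
  | a :: b :: c :: rest =>
    if !(PySem.Set.equal (pvKeyB a) (pvKeyB b)) then
      if !(PySem.Set.equal (pvKeyB a) (pvKeyB c)) then some a else some b
    else pvScanB (pvKeyB a) (c :: rest)
  | _ => none

-- ===== PRECONDITION & SPEC =====
def Spec_find_uniq (arr : List String) (out : Option String) : Prop := out = find_uniq_alt arr
instance (arr : List String) (out : Option String) : Decidable (Spec_find_uniq arr out) := by unfold Spec_find_uniq; infer_instance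

-- ===== CLAIM (what is proved, stated in full; the proofs are below) =====
def Claim_equal_find_uniq : Prop := ∀ (arr : List String), Dom_find_uniq arr → Spec_find_uniq arr (find_uniq arr)

-- ===== LEMMAS AND PROOFS =====

theorem pvKeyB_eq_pvKeyA (s : String) : pvKeyB s = pvKeyA s := rfl

theorem pvEqual_refl (s : PySem.Set Char) : PySem.Set.equal s s = true :=
  (PySem.Set.equal_iff s s).mpr (fun _ => Iff.rfl)

theorem pvEqual_symm (s t : PySem.Set Char) :
    PySem.Set.equal s t = PySem.Set.equal t s := by
  by_cases h : PySem.Set.equal s t = true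
  · have h' := (PySem.Set.equal_iff s t).mp h
    rw [h, (PySem.Set.equal_iff t s).mpr (fun x => (h' x).symm)]
  · have h2 : ¬ PySem.Set.equal t s = true := fun h2 =>
      h ((PySem.Set.equal_iff s t).mpr (fun x => ((PySem.Set.equal_iff t s).mp h2 x).symm))
    rw [Bool.not_eq_true] at h h2
    rw [h, h2]

theorem pvEqual_trans {s t u : PySem.Set Char}
    (h1 : PySem.Set.equal s t = true) (h2 : PySem.Set.equal t u = true) :
    PySem.Set.equal s u = true :=
  (PySem.Set.equal_iff s u).mpr
    (fun x => ((PySem.Set.equal_iff s t).mp h1 x).trans ((PySem.Set.equal_iff t u).mp h2 x))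

-- membership in the combination lists
theorem mem_pvPairs2 {l : List String} {p : String × String}
    (h : p ∈ pvPairs2 l) : p.1 ∈ l ∧ p.2 ∈ l := by
  induction l with
  | nil => simp [pvPairs2] at h
  | cons x xs ih =>
    simp only [pvPairs2, List.mem_append, List.mem_map] at h
    rcases h with ⟨y, hy, rfl⟩ | h
    · exact ⟨List.mem_cons_self .., List.mem_cons_of_mem _ hy⟩
    · exact ⟨List.mem_cons_of_mem _ (ih h).1, List.mem_cons_of_mem _ (ih h).2⟩

theorem mem_pvCombos3 {l : List String} {t : String × String × String}
    (h : t ∈ pvCombos3 l) : t.1 ∈ l ∧ t.2.1 ∈ l ∧ t.2.2 ∈ l := by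
  induction l with
  | nil => simp [pvCombos3] at h
  | cons x xs ih =>
    simp only [pvCombos3, List.mem_append, List.mem_map] at h
    rcases h with ⟨p, hp, rfl⟩ | h
    · have := mem_pvPairs2 hp
      exact ⟨List.mem_cons_self .., List.mem_cons_of_mem _ this.1,
        List.mem_cons_of_mem _ this.2⟩
    · exact ⟨List.mem_cons_of_mem _ (ih h).1, List.mem_cons_of_mem _ (ih h).2.1,
        List.mem_cons_of_mem _ (ih h).2.2⟩

-- if every triple has all-equal key sets the loop returns None
theorem pvLoopA_none {L : List (String × String × String)}
    (h : ∀ t ∈ L, PySem.Set.equal (pvKeyA t.1) (pvKeyA t.2.1) = true ∧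
                  PySem.Set.equal (pvKeyA t.1) (pvKeyA t.2.2) = true) :
    pvLoopA L = none := by
  induction L with
  | nil => rfl
  | cons t rest ih =>
    obtain ⟨f, s, u⟩ := t
    have ht := h _ (List.mem_cons_self ..)
    simp only [pvLoopA, ht.1, ht.2, Bool.not_true, Bool.false_eq_true, if_false]
    exact ih (fun t' h' => h _ (List.mem_cons_of_mem _ h'))

-- a None scan means every element key equals k
theorem pvScanB_none {k : PySem.Set Char} {l : List String}
    (h : pvScanB k l = none) : ∀ s ∈ l, PySem.Set.equal (pvKeyA s) k = true := by
  induction l with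
  | nil => simp
  | cons x xs ih =>
    intro s hs
    simp only [pvScanB, pvKeyB_eq_pvKeyA] at h
    by_cases hx : PySem.Set.equal (pvKeyA x) k = true
    · simp only [hx, Bool.not_true, Bool.false_eq_true, if_false] at h
      rcases List.mem_cons.mp hs with rfl | hs'
      · exact hx
      · exact ih h s hs'
    · simp only [Bool.not_eq_true] at hx
      simp [hx] at h

-- when first == second, the block of (a,b,·) triples behaves like the linear scan
theorem pvLoopA_block {a b : String} (hab : PySem.Set.equal (pvKeyA a) (pvKeyA b) = true)
    (l : List String) (tail : List (String × String × String)) :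
    pvLoopA (l.map (fun t => (a, b, t)) ++ tail) =
      match pvScanB (pvKeyA a) l with
      | some s => some s
      | none => pvLoopA tail := by
  induction l with
  | nil => simp [pvScanB]
  | cons x xs ih =>
    simp only [List.map_cons, List.cons_append, pvLoopA, hab, Bool.not_true,
      Bool.false_eq_true, if_false, pvScanB, pvKeyB_eq_pvKeyA]
    by_cases hx : PySem.Set.equal (pvKeyA a) (pvKeyA x) = true
    · have hx2 : PySem.Set.equal (pvKeyA x) (pvKeyA a) = true :=
        (pvEqual_symm (pvKeyA x) (pvKeyA a)).trans hx
      simp only [hx, hx2, Bool.not_true, Bool.false_eq_true, if_false]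
      exact ih
    · simp only [Bool.not_eq_true] at hx
      have hx2 : PySem.Set.equal (pvKeyA x) (pvKeyA a) = false :=
        (pvEqual_symm (pvKeyA x) (pvKeyA a)).trans hx
      simp [hx, hx2]

-- ===== VERDICT (by name: the statement is the Claim_ definition above) =====
theorem find_uniq_spec : Claim_equal_find_uniq := by
  intro arr _
  unfold Spec_find_uniq
  match arr with
  | [] => rfl
  | [a] => rfl
  | [a, b] => rfl
  | a :: b :: c :: rest =>
    have hcomb : pvCombos3 (a :: b :: c :: rest) =
        (c :: rest).map (fun t => (a, b, t)) ++
          ((pvPairs2 (c :: rest)).map (fun p => (a, p.1, p.2)) ++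
            pvCombos3 (b :: c :: rest)) := by
      simp [pvCombos3, pvPairs2, List.map_map, Function.comp, List.map_append,
        List.append_assoc]
    show pvLoopA (pvCombos3 (a :: b :: c :: rest)) = _
    rw [hcomb]
    by_cases hab : PySem.Set.equal (pvKeyA a) (pvKeyA b) = true
    · rw [pvLoopA_block hab]
      simp only [find_uniq_alt, pvKeyB_eq_pvKeyA, hab, Bool.not_true,
        Bool.false_eq_true, if_false]
      cases hscan : pvScanB (pvKeyA a) (c :: rest) with
      | some s => rfl
      | none =>
        have hall := pvScanB_none hscan
        have hmem : ∀ s ∈ (a :: b :: c :: rest),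
            PySem.Set.equal (pvKeyA a) (pvKeyA s) = true := by
          intro s hs
          rcases List.mem_cons.mp hs with rfl | hs
          · exact pvEqual_refl _
          · rcases List.mem_cons.mp hs with rfl | hs
            · exact hab
            · rw [pvEqual_symm]; exact hall s hs
        apply pvLoopA_none
        intro t ht
        have hcmp : t.1 ∈ (a :: b :: c :: rest) ∧ t.2.1 ∈ (a :: b :: c :: rest) ∧
            t.2.2 ∈ (a :: b :: c :: rest) := by
          rcases List.mem_append.mp ht with h | h
          · obtain ⟨p, hp, rfl⟩ := List.mem_map.mp h
            have := mem_pvPairs2 hp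
            exact ⟨List.mem_cons_self ..,
              List.mem_cons_of_mem _ (List.mem_cons_of_mem _ this.1),
              List.mem_cons_of_mem _ (List.mem_cons_of_mem _ this.2)⟩
          · have := mem_pvCombos3 h
            exact ⟨List.mem_cons_of_mem _ this.1, List.mem_cons_of_mem _ this.2.1,
              List.mem_cons_of_mem _ this.2.2⟩
        have e1 := hmem _ hcmp.1
        have e2 := hmem _ hcmp.2.1
        have e3 := hmem _ hcmp.2.2
        rw [pvEqual_symm] at e1
        exact ⟨pvEqual_trans e1 e2, pvEqual_trans e1 e3⟩
    · simp only [Bool.not_eq_true] at hab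
      simp [pvLoopA, find_uniq_alt, pvKeyB_eq_pvKeyA, hab]
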